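-- pv_equiv track=rewrite | github.com/KaioGabriel-the/Algoritmo | bee/beepy/bee1024.py | verificacao3
-- ===== SOURCE A (Python) =====
-- def verificacao3(code):
--     metade = len(code) // 2
--     new_string = ''
--
--     for i in range(len(code)):
--
--         if i < metade:
--             new_string += code[i]
--         else:
--             index = chr(ord(code[i])- 1)
--             new_string = new_string + index
--
--     return new_string
-- ===== SOURCE B (Python) =====
-- def verificacao3(code):
--     # Mutate a byte buffer in place: only the second half's positions are
--     # visited and decremented; the first half is never touched or copied.
--     # (exact for the printable-ASCII domain, where one char = one byte)
--     buf = bytearray(code.encode())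
--     for i in range(len(buf) // 2, len(buf)):
--         buf[i] -= 1
--     return buf.decode()
-- ===== Notes on version B (the rewrite author's own statement) =====
-- stated objective: alternative
-- what changed: Instead of one branching pass over all indices accumulating a new string, B mutates a bytearray in place, looping only over the second half's indices and decrementing each byte; the first half is never visited or copied.
import Mathlib
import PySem

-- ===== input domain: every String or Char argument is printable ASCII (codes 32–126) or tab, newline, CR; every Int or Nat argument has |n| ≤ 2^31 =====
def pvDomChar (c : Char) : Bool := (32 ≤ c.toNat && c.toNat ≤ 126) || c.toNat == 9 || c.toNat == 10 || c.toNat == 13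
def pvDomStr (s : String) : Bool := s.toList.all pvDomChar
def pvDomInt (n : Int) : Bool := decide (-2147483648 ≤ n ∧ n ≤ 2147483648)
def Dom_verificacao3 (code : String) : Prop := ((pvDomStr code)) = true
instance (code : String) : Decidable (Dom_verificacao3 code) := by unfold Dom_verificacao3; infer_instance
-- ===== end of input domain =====

-- B mutates a byte buffer in place over only the second half's indices instead of
-- A's branching pass over all indices accumulating a new string: alternative structure.

-- ===== PORT A =====
-- single pass over all indices, appending one character per step
def verificacao3 (code : String) : String :=
  let cs := code.toList
  let metade : Int := PySem.Int.floordiv (cs.length : Int) 2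
  String.ofList ((PySem.List.pyRange 0 (cs.length : Int) 1).foldl
    (fun acc i =>
      if i < metade then acc ++ [PySem.List.pyGetD cs i ' ']
      else acc ++ [Char.ofNat ((PySem.List.pyGetD cs i ' ').toNat - 1)]) [])

-- ===== PORT B =====
-- byte buffer (Char.toNat = the byte of each char, exact on the ASCII domain),
-- mutated in place over range(len//2, len); i ≥ 0 on this range, so i.toNat is exact
def verificacao3_alt (code : String) : String :=
  let buf := code.toList.map Char.toNat
  let buf2 := (PySem.List.pyRange (PySem.Int.floordiv (buf.length : Int) 2) (buf.length : Int) 1).foldl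
    (fun b i => b.set i.toNat (PySem.List.pyGetD b i 0 - 1)) buf
  String.ofList (buf2.map Char.ofNat)

-- ===== PRECONDITION & SPEC =====
def Spec_verificacao3 (code : String) (out : String) : Prop := out = verificacao3_alt code
instance (code : String) (out : String) : Decidable (Spec_verificacao3 code out) := by unfold Spec_verificacao3; infer_instance

-- ===== CLAIM (what is proved, stated in full; the proofs are below) =====
def Claim_equal_verificacao3 : Prop := ∀ (code : String), Dom_verificacao3 code → Spec_verificacao3 code (verificacao3 code)

-- ===== LEMMAS AND PROOFS =====

-- A's loop restricted to indices all below the cut appends via the 'then' branch only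
lemma foldl_if_lt_all (g h : Int → Char) (m : Int) (l : List Int)
    (hl : ∀ i ∈ l, i < m) (acc : List Char) :
    l.foldl (fun acc i =>
      if i < m then acc ++ [g i] else acc ++ [h i]) acc = acc ++ l.map g := by
  induction l generalizing acc with
  | nil => simp
  | cons x xs ih =>
    have hx : x < m := hl x (by simp)
    simp [hx, ih (fun i hi => hl i (by simp [hi]))]

-- A's loop restricted to indices all at/above the cut appends via the 'else' branch only
lemma foldl_if_ge_all (g h : Int → Char) (m : Int) (l : List Int)
    (hl : ∀ i ∈ l, ¬ i < m) (acc : List Char) :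
    l.foldl (fun acc i =>
      if i < m then acc ++ [g i] else acc ++ [h i]) acc = acc ++ l.map h := by
  induction l generalizing acc with
  | nil => simp
  | cons x xs ih =>
    have hx : ¬ x < m := hl x (by simp)
    simp [hx, ih (fun i hi => hl i (by simp [hi]))]

-- indexing over range(0, k) with k ≤ len recovers the prefix take k
lemma map_pyGetD_range_take (cs : List Char) (k : Nat) (hk : k ≤ cs.length) (d : Char) :
    (PySem.List.pyRange 0 (k : Int) 1).map (fun j => PySem.List.pyGetD cs j d) = cs.take k := by
  have h1 : (PySem.List.pyRange 0 ((cs.take k).length : Int) 1).map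
      (fun j => PySem.List.pyGetD (cs.take k) j d) = cs.take k :=
    PySem.List.map_pyGetD_pyRange_zero' (cs.take k) d
  have hlen : (cs.take k).length = k := by simp [hk]
  rw [hlen] at h1
  rw [← h1]
  apply List.map_congr_left
  intro j hj
  rw [PySem.List.mem_pyRange_one] at hj
  have h0 : 0 ≤ j := hj.1
  have hjk : j < (k : Int) := hj.2
  obtain ⟨jn, rfl⟩ := Int.eq_ofNat_of_zero_le h0
  have hjn : jn < k := by exact_mod_cast hjk
  simp [List.getD_eq_getElem?_getD, hjn]

-- B's in-place decrement loop over range(m, len) leaves the prefix and maps (·-1) on the suffix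
lemma foldl_set_dec : ∀ (k : Nat) (b : List Nat) (m : Nat), b.length = m + k →
    (PySem.List.pyRange (m : Int) (b.length : Int) 1).foldl
      (fun b i => b.set i.toNat (PySem.List.pyGetD b i 0 - 1)) b
    = b.take m ++ (b.drop m).map (fun x => x - 1) := by
  intro k
  induction k with
  | zero =>
    intro b m hlen
    have hnil : PySem.List.pyRange (m : Int) (b.length : Int) 1 = [] :=
      PySem.List.pyRange_one_eq_nil (by exact_mod_cast Nat.le_of_eq hlen)
    rw [hnil, List.foldl_nil, List.take_of_length_le (by omega),
        List.drop_eq_nil_of_le (by omega)]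
    simp
  | succ k ih =>
    intro b m hlen
    have hm : m < b.length := by omega
    rw [PySem.List.pyRange_one_cons (by exact_mod_cast hm)]
    rw [List.foldl_cons]
    have hget : PySem.List.pyGetD b (m : Int) 0 = b[m] := by
      simp [List.getD_eq_getElem?_getD, hm]
    have hb' : b.set (m : Int).toNat (PySem.List.pyGetD b (m : Int) 0 - 1)
        = b.take m ++ (b[m] - 1) :: b.drop (m + 1) := by
      rw [hget]
      simp [List.set_eq_take_append_cons_drop, hm]
    rw [hb']
    set b' : List Nat := b.take m ++ (b[m] - 1) :: b.drop (m + 1) with hb'def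
    have hlen' : b'.length = b.length := by
      simp [hb'def]
      omega
    have hlen'' : b'.length = (m + 1) + k := by omega
    have hcast : ((m : Int) + 1) = ((m + 1 : Nat) : Int) := by push_cast; ring
    rw [hcast, show (b.length : Int) = (b'.length : Int) by rw [hlen'],
        ih b' (m + 1) hlen'']
    have htm : (b.take m).length = m := by simp [le_of_lt hm]
    have h1 : b'.take (m + 1) = b.take m ++ [b[m] - 1] := by
      rw [hb'def, List.take_append, htm]
      simp [List.take_of_length_le (show (b.take m).length ≤ m + 1 by rw [htm]; omega)]
    have h2 : b'.drop (m + 1) = b.drop (m + 1) := by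
      rw [hb'def, List.drop_append, htm]
      simp [List.drop_eq_nil_of_le (show (b.take m).length ≤ m + 1 by rw [htm]; omega)]
    have h3 : b.drop m = b[m] :: b.drop (m + 1) := List.drop_eq_getElem_cons hm
    rw [h1, h2, h3]
    simp only [List.map_cons, List.append_assoc, List.cons_append, List.nil_append]

theorem verificacao3_spec : Claim_equal_verificacao3 := by
  intro code _
  unfold Spec_verificacao3
  simp only [verificacao3, verificacao3_alt]
  set cs := code.toList with hcs
  set n : Nat := cs.length with hn
  have hm : PySem.Int.floordiv (n : Int) 2 = ((n / 2 : Nat) : Int) := by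
    rw [PySem.Int.floordiv, Int.fdiv_eq_ediv]
    simp
  set m : Nat := n / 2 with hmdef
  have hmn : m ≤ n := Nat.div_le_self n 2
  -- A's side: prefix copied, suffix shifted
  rw [hm]
  rw [PySem.List.pyRange_one_append 0 (m : Int) (n : Int) (by positivity) (by exact_mod_cast hmn)]
  rw [List.foldl_append]
  rw [foldl_if_lt_all _ _ _ _ (fun i hi => (PySem.List.mem_pyRange_one.mp hi).2) []]
  rw [foldl_if_ge_all _ _ _ _ (fun i hi => by
        have := (PySem.List.mem_pyRange_one.mp hi).1; omega) _]
  rw [map_pyGetD_range_take cs m hmn ' ']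
  have h2 : (PySem.List.pyRange (m : Int) (cs.length : Int) 1).map
      (fun j => PySem.List.pyGetD cs j ' ') = cs.drop ((m : Int)).toNat :=
    PySem.List.map_pyGetD_pyRange' (a := (m : Int)) cs ' ' (by positivity)
  have h3 : (PySem.List.pyRange (m : Int) (n : Int) 1).map
      (fun i => Char.ofNat ((PySem.List.pyGetD cs i ' ').toNat - 1))
      = (cs.drop m).map (fun c => Char.ofNat (c.toNat - 1)) := by
    rw [show (fun i => Char.ofNat ((PySem.List.pyGetD cs i ' ').toNat - 1))
        = (fun c : Char => Char.ofNat (c.toNat - 1)) ∘ (fun j => PySem.List.pyGetD cs j ' ')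
        from rfl, ← List.map_map, hn, h2]
    simp
  rw [h3]
  -- B's side: the set-loop on the byte buffer
  have hblen : (cs.map Char.toNat).length = n := by rw [List.length_map]
  have hm' : PySem.Int.floordiv (((cs.map Char.toNat).length : Int)) 2 = ((m : Int)) := by
    rw [hblen, hm]
  have hB := foldl_set_dec (n - m) (cs.map Char.toNat) m (by rw [List.length_map, ← hn]; omega)
  rw [hblen] at hB
  rw [hm', hblen, hB]
  simp [List.map_take, List.map_drop, List.map_map, Function.comp_def, Char.ofNat_toNat]

-- ===== VERDICT (by name: the statement is the Claim_ definition above) =====
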